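-- pv_equiv track=rewrite | github.com/tomfluff/UTokyo_CI_Entrance_Exam | 2014-Winter/q_08.py | f_dyn
-- ===== SOURCE A (Python) =====
-- def f_dyn(x):
--     mem = ['0' for i in range(x)]
--     mem[0] = '1'
--     if x > 1:
--         mem[1] = '1'
--     for i in range(3,x+1):
--         r = get_sum_of_dec(mem[i-2], mem[i-3])
--         mem[i-1] = r
--
--     return mem
--
-- def get_sum_of_dec(a,b):
--     if len(a) >= len(b):
--         a_rev = a[::-1]
--         b_rev = b[::-1]
--     else:
--         a_rev = b[::-1]
--         b_rev = a[::-1]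
--     res = ""
--     i = 0
--     c = 0
--     for d in a_rev:
--         if i >= len(b_rev):
--             b_n = 0
--         else:
--             b_n = int(b_rev[i])
--         r = int(d) + b_n + c
--         if r > 9:
--             r = r % 10
--             c = 1
--         else:
--             c = 0
--         res += str(r)
--         i += 1
--
--     if c != 0:
--         res += str(c)
--
--     return res[::-1]
-- ===== SOURCE B (Python) =====
-- def f_dyn(x):
--     out = []
--     a, b = 1, 1
--     for _ in range(x):
--         out.append(str(a))
--         a, b = b, a + b
--     return out
-- ===== Notes on version B (the rewrite author's own statement) =====
-- stated objective: simpler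
-- what changed: B drops the mem array, the index arithmetic and the whole hand-written digit-by-digit decimal adder get_sum_of_dec, keeping just a running pair of native integers and appending str(a) each iteration.
import Mathlib
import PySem

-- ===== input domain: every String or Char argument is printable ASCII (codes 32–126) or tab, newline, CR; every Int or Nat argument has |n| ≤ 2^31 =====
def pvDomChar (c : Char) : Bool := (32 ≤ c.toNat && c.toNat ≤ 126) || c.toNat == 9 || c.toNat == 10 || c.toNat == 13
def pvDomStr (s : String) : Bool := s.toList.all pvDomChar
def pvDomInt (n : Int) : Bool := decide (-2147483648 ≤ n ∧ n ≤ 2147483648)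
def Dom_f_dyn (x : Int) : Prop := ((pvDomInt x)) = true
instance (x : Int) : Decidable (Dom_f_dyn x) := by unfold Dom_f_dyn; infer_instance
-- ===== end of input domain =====

-- B replaces A's per-digit string adder (get_sum_of_dec) with a single running pair of
-- integers, converting to decimal strings with str(); objective: simpler.


-- ===== PORT A =====
-- int(d) for a one-character digit string; the .getD 0 default is never reached on the digit
-- characters this program feeds it (exact there)
def pvIntOfDigitChar (d : Char) : Int := (PySem.Int.ofChars? [d]).getD 0

-- port of get_sum_of_dec; strings are handled as their char lists, s[::-1] is List.reverse (exact)
def get_sum_of_dec (a b : String) : String :=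
  let p : List Char × List Char :=
    if PySem.Str.len b ≤ PySem.Str.len a then (a.toList.reverse, b.toList.reverse)
    else (b.toList.reverse, a.toList.reverse)
  let b_rev := p.2
  let st := p.1.foldl (fun (st : List Char × Int × Int) d =>
      let b_n : Int := if (b_rev.length : Int) ≤ st.2.1 then 0
        else pvIntOfDigitChar ((PySem.List.pyGet? b_rev st.2.1).getD '0')
      let r := pvIntOfDigitChar d + b_n + st.2.2
      let rc : Int × Int := if 9 < r then (PySem.Int.mod r 10, 1) else (r, 0)
      (st.1 ++ PySem.Int.toChars rc.1, st.2.1 + 1, rc.2)) ([], 0, 0)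
  let res := if st.2.2 ≠ 0 then st.1 ++ PySem.Int.toChars st.2.2 else st.1
  String.ofList res.reverse

-- mem[0] = '1' raises IndexError when x ≤ 0; those inputs are excluded by Pre_f_dyn,
-- so the total List.set/pyGet? renderings below are exact on the admitted domain.
def f_dyn (x : Int) : List String :=
  let mem := (PySem.List.pyRange 0 x).map (fun _ => "0")
  let mem := mem.set 0 "1"
  let mem := if 1 < x then mem.set 1 "1" else mem
  (PySem.List.pyRange 3 (x+1)).foldl (fun mem i =>
    mem.set (i-1).toNat (get_sum_of_dec ((PySem.List.pyGet? mem (i-2)).getD "")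
                                        ((PySem.List.pyGet? mem (i-3)).getD ""))) mem

-- ===== PORT B =====
def f_dyn_alt (x : Int) : List String :=
  ((PySem.List.pyRange 0 x).foldl
    (fun (st : List String × Int × Int) _ =>
      (st.1 ++ [PySem.Int.toStr st.2.1], st.2.2, st.2.1 + st.2.2))
    ([], 1, 1)).1

-- ===== PRECONDITION & SPEC =====
-- A raises IndexError (mem[0] = '1' on an empty list) whenever x ≤ 0
def Pre_f_dyn (x : Int) : Prop := 1 ≤ x
instance (x : Int) : Decidable (Pre_f_dyn x) := by unfold Pre_f_dyn; infer_instance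
def pvWitness_f_dyn : Int := 5

def Spec_f_dyn (x : Int) (out : List String) : Prop := out = f_dyn_alt x
instance (x : Int) (out : List String) : Decidable (Spec_f_dyn x out) := by unfold Spec_f_dyn; infer_instance

-- ===== CLAIM (what is proved, stated in full; the proofs are below) =====
def Claim_equal_f_dyn : Prop := ∀ (x : Int), Dom_f_dyn x → Pre_f_dyn x → Spec_f_dyn x (f_dyn x)

-- ===== LEMMAS AND PROOFS =====


lemma pv_toDigitsCore_eq (f : Nat) : ∀ (n : Nat) (l : List Char), n ≠ 0 → n < 10 ^ f →
    Nat.toDigitsCore 10 f n l = ((Nat.digits 10 n).map Nat.digitChar).reverse ++ l := by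
  induction f with
  | zero => intro n l hn h; simp at h; omega
  | succ f ih =>
    intro n l hn h
    rw [Nat.toDigitsCore]
    by_cases h10 : n / 10 = 0
    · have hlt : n < 10 := by omega
      rw [if_pos h10, Nat.digits_def' (by norm_num) (by omega), h10]
      simp [Nat.mod_eq_of_lt hlt]
    · rw [if_neg h10, ih (n / 10) _ h10 (Nat.div_lt_of_lt_mul (by rw [pow_succ] at h; linarith))]
      rw [show Nat.digits 10 n = n % 10 :: Nat.digits 10 (n/10) from
        Nat.digits_def' (by norm_num) (by omega)]
      simp

lemma pv_toDigits_eq (n : Nat) (hn : n ≠ 0) :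
    Nat.toDigits 10 n = ((Nat.digits 10 n).map Nat.digitChar).reverse := by
  have := pv_toDigitsCore_eq (n+1) n [] hn (by
    calc n < n + 1 := Nat.lt_succ_self n
    _ ≤ 10 ^ (n+1) := Nat.le_of_lt (Nat.lt_pow_self (by norm_num)))
  simpa [Nat.toDigits] using this

lemma pv_toChars_eq (n : Nat) (hn : n ≠ 0) :
    PySem.Int.toChars (n : Int) = ((Nat.digits 10 n).map Nat.digitChar).reverse := by
  rw [PySem.Int.toChars]
  rw [if_neg (by omega)]
  simpa using pv_toDigits_eq n hn

lemma pv_getLast?_cons {α : Type} (a : α) (l : List α) (h : l ≠ []) :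
    (a :: l).getLast? = l.getLast? := by
  cases l with
  | nil => simp at h
  | cons b t => exact List.getLast?_cons_cons ..

def pvAddLoop : List Nat → List Nat → Nat → (List Nat × Nat)
  | [], _, c => ([], c)
  | d :: u, v, c =>
      let r := d + (v.head?.getD 0) + c
      let t := pvAddLoop u v.tail (r / 10)
      (r % 10 :: t.1, t.2)

lemma pv_addLoop_spec (u : List Nat) : ∀ (v : List Nat) (c : Nat),
    (∀ d ∈ u, d < 10) → (∀ d ∈ v, d < 10) → c ≤ 1 → v.length ≤ u.length →
    Nat.ofDigits 10 (pvAddLoop u v c).1 + (pvAddLoop u v c).2 * 10 ^ u.length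
        = Nat.ofDigits 10 u + Nat.ofDigits 10 v + c
      ∧ (∀ d ∈ (pvAddLoop u v c).1, d < 10)
      ∧ (pvAddLoop u v c).2 ≤ 1
      ∧ (pvAddLoop u v c).1.length = u.length
      ∧ ((pvAddLoop u v c).2 = 0 → u.getLast?.getD 0 ≤ (pvAddLoop u v c).1.getLast?.getD 0) := by
  induction u with
  | nil =>
    intro v c hu hv hc hlen
    have hv0 : v = [] := List.eq_nil_of_length_eq_zero (by simpa using hlen)
    subst hv0
    refine ⟨?_, ?_, hc, rfl, ?_⟩ <;> simp [pvAddLoop, Nat.ofDigits]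
  | cons d u ih =>
    intro v c hu hv hc hlen
    have hd : d < 10 := hu d (by simp)
    have hb : v.head?.getD 0 < 10 := by
      cases v with
      | nil => simp
      | cons b v => exact hv b (by simp)
    have hcar : (d + v.head?.getD 0 + c) / 10 ≤ 1 := by omega
    have htail : ∀ e ∈ v.tail, e < 10 := fun e he => hv e (List.mem_of_mem_tail he)
    have hlt : v.tail.length ≤ u.length := by
      cases v <;> simp_all
    obtain ⟨ihval, ihdig, ihc, ihlen, ihlast⟩ :=
      ih v.tail ((d + v.head?.getD 0 + c) / 10) (fun e he => hu e (by simp [he])) htail hcar hlt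
    have hv' : Nat.ofDigits 10 v = (v.head?.getD 0) + 10 * Nat.ofDigits 10 v.tail := by
      cases v with
      | nil => simp [Nat.ofDigits]
      | cons b v => simp [Nat.ofDigits_cons]
    refine ⟨?_, ?_, ihc, ?_, ?_⟩
    · simp only [pvAddLoop, Nat.ofDigits_cons, List.length_cons]
      rw [pow_succ, hv']
      have hmd : (d + v.head?.getD 0 + c) % 10 + 10 * ((d + v.head?.getD 0 + c) / 10)
          = d + v.head?.getD 0 + c := Nat.mod_add_div _ 10
      ring_nf at ihval ⊢
      linarith [ihval, hmd]
    · intro e he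
      simp only [pvAddLoop] at he
      rcases List.mem_cons.mp he with h | h
      · omega
      · exact ihdig e h
    · simp only [pvAddLoop, List.length_cons, ihlen]
    · intro hz
      simp only [pvAddLoop] at hz ⊢
      by_cases hu0 : u = []
      · subst hu0
        have hvt : v.tail = [] := by
          apply List.eq_nil_of_length_eq_zero
          rw [List.length_tail]
          simp at hlt
          omega
        simp [pvAddLoop] at hz ⊢
        omega
      · have h1 : (pvAddLoop u v.tail ((d + v.head?.getD 0 + c) / 10)).1 ≠ [] := by
          intro h
          apply hu0
          apply List.eq_nil_of_length_eq_zero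
          rw [← ihlen, h]
          rfl
        rw [pv_getLast?_cons _ _ hu0, pv_getLast?_cons _ _ h1]
        exact ihlast hz

lemma pv_dc_val (d : Nat) (hd : d < 10) : pvIntOfDigitChar (Nat.digitChar d) = (d : Int) := by
  interval_cases d <;> decide

lemma pv_toChars_digit (d : Nat) (hd : d < 10) :
    PySem.Int.toChars (d : Int) = [Nat.digitChar d] := by
  interval_cases d <;> decide

lemma pv_mod_ten (n : Nat) : PySem.Int.mod (n : Int) 10 = ((n % 10 : Nat) : Int) := by
  rw [PySem.Int.mod_eq_emod_of_pos (by norm_num)]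
  norm_cast

lemma pv_fold_eq_addLoop (v : List Nat) (hv : ∀ d ∈ v, d < 10) (u : List Nat) :
    ∀ (res : List Char) (i c : Nat), (∀ d ∈ u, d < 10) → c ≤ 1 →
    (u.map Nat.digitChar).foldl (fun (st : List Char × Int × Int) d =>
      let b_n : Int := if (((v.map Nat.digitChar).length : Nat) : Int) ≤ st.2.1 then 0
        else pvIntOfDigitChar ((PySem.List.pyGet? (v.map Nat.digitChar) st.2.1).getD '0')
      let r := pvIntOfDigitChar d + b_n + st.2.2
      let rc : Int × Int := if 9 < r then (PySem.Int.mod r 10, 1) else (r, 0)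
      (st.1 ++ PySem.Int.toChars rc.1, st.2.1 + 1, rc.2)) (res, (i : Int), (c : Int))
    = (res ++ ((pvAddLoop u (v.drop i) c).1.map Nat.digitChar),
       ((i + u.length : Nat) : Int), (((pvAddLoop u (v.drop i) c).2 : Nat) : Int)) := by
  induction u with
  | nil => intro res i c hu hc; simp [pvAddLoop]
  | cons d u ih =>
    intro res i c hu hc
    have hd : d < 10 := hu d (by simp)
    have hbv : (v.drop i).head?.getD 0 < 10 := by
      cases hh : (v.drop i).head? with
      | none => simp
      | some b =>
        have : b ∈ v := List.mem_of_mem_drop (List.mem_of_mem_head? hh)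
        simpa [hh] using hv b this
    have hbn : (if (((v.map Nat.digitChar).length : Nat) : Int) ≤ ((i : Nat) : Int) then (0:Int)
        else pvIntOfDigitChar ((PySem.List.pyGet? (v.map Nat.digitChar) ((i : Nat) : Int)).getD '0'))
        = (((v.drop i).head?.getD 0 : Nat) : Int) := by
      by_cases hlen : v.length ≤ i
      · rw [if_pos (by simpa using Int.ofNat_le.mpr hlen)]
        simp [List.drop_eq_nil_of_le hlen]
      · rw [not_le] at hlen
        rw [if_neg (by simpa using not_le.mpr (by exact_mod_cast hlen))]
        rw [PySem.List.pyGet?_natCast]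
        rw [List.getElem?_map]
        rw [← List.head?_drop]
        cases hh : (v.drop i).head? with
        | none =>
          exfalso
          rw [List.head?_drop] at hh
          exact absurd (List.getElem?_eq_none_iff.mp hh) (by omega)
        | some b =>
          simp only [Option.map_some, Option.getD_some]
          exact pv_dc_val b (by simpa [hh] using hbv)
    simp only [List.map_cons, List.foldl_cons]
    rw [hbn, pv_dc_val d hd]
    have hsum : ((d : Int) + ((v.drop i).head?.getD 0 : Nat) + (c : Int))
        = (((d + (v.drop i).head?.getD 0 + c : Nat)) : Int) := by push_cast; ring
    rw [hsum]
    set N := d + (List.drop i v).head?.getD 0 + c with hNdef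
    have hN19 : N ≤ 19 := by omega
    have hi1 : ((i : Int) + 1) = (((i + 1 : Nat)) : Int) := by push_cast; ring
    have hunf : pvAddLoop (d::u) (List.drop i v) c
        = (N % 10 :: (pvAddLoop u (List.drop (i+1) v) (N/10)).1,
           (pvAddLoop u (List.drop (i+1) v) (N/10)).2) := by
      rw [hNdef]
      simp [pvAddLoop, List.tail_drop]
    by_cases h9 : (9 : Int) < (N : Int)
    · rw [if_pos h9]
      have h9n : 9 < N := by exact_mod_cast h9
      simp only [pv_mod_ten N, pv_toChars_digit (N % 10) (by omega)]
      rw [show ((res ++ [(N % 10).digitChar], (i:Int) + 1, (1:Int)) : List Char × Int × Int)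
          = (res ++ [(N % 10).digitChar], ((i+1:Nat) : Int), ((N/10 : Nat) : Int)) from by
        rw [hi1]
        have : N / 10 = 1 := by omega
        rw [this]
        norm_num]
      rw [ih (res ++ [(N % 10).digitChar]) (i+1) (N/10)
            (fun e he => hu e (by simp [he])) (by omega)]
      rw [hunf]
      simp only [List.map_cons, List.length_cons, List.cons_append, List.nil_append,
        List.append_assoc, Prod.mk.injEq, true_and, and_true]
      omega
    · rw [if_neg h9]
      have h9n : N ≤ 9 := by omega
      have hm : N % 10 = N := Nat.mod_eq_of_lt (by omega)
      simp only [pv_toChars_digit N (by omega)]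
      rw [show ((res ++ [N.digitChar], (i:Int) + 1, (0:Int)) : List Char × Int × Int)
          = (res ++ [N.digitChar], ((i+1:Nat) : Int), ((N/10 : Nat) : Int)) from by
        rw [hi1]
        have : N / 10 = 0 := by omega
        rw [this]
        norm_num]
      rw [ih (res ++ [N.digitChar]) (i+1) (N/10)
            (fun e he => hu e (by simp [he])) (by omega)]
      rw [hunf, hm]
      simp only [List.map_cons, List.length_cons, List.cons_append, List.nil_append,
        List.append_assoc, Prod.mk.injEq, true_and, and_true]
      omega


-- decimal-string addition: get_sum_of_dec on str(m), str(k)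
lemma pv_getLast_getD (l : List Nat) (h : l ≠ []) : l.getLast h = l.getLast?.getD 0 := by
  rw [List.getLast?_eq_some_getLast h]
  rfl

lemma pv_core (m k : Nat) (hm : 1 ≤ m) (hk : 1 ≤ k)
    (hlen : (Nat.digits 10 k).length ≤ (Nat.digits 10 m).length) :
    (let st := ((Nat.digits 10 m).map Nat.digitChar).foldl (fun (st : List Char × Int × Int) d =>
      let b_n : Int := if ((((Nat.digits 10 k).map Nat.digitChar).length : Nat) : Int) ≤ st.2.1 then 0
        else pvIntOfDigitChar ((PySem.List.pyGet? ((Nat.digits 10 k).map Nat.digitChar) st.2.1).getD '0')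
      let r := pvIntOfDigitChar d + b_n + st.2.2
      let rc : Int × Int := if 9 < r then (PySem.Int.mod r 10, 1) else (r, 0)
      (st.1 ++ PySem.Int.toChars rc.1, st.2.1 + 1, rc.2)) ([], 0, 0)
     let res := if st.2.2 ≠ 0 then st.1 ++ PySem.Int.toChars st.2.2 else st.1
     String.ofList res.reverse) = PySem.Int.toStr ((m + k : Nat) : Int) := by
  have hU : ∀ d ∈ Nat.digits 10 m, d < 10 := fun d h => Nat.digits_lt_base (by norm_num) h
  have hV : ∀ d ∈ Nat.digits 10 k, d < 10 := fun d h => Nat.digits_lt_base (by norm_num) h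
  obtain ⟨hval, hdig, hc1, hlen1, hlast⟩ :=
    pv_addLoop_spec (Nat.digits 10 m) (Nat.digits 10 k) 0 hU hV (by omega) hlen
  have hfold := pv_fold_eq_addLoop (Nat.digits 10 k) hV (Nat.digits 10 m) [] 0 0 hU (by omega)
  simp only [Nat.cast_zero, List.drop_zero, List.nil_append] at hfold
  set t := pvAddLoop (Nat.digits 10 m) (Nat.digits 10 k) 0 with ht
  simp only []
  rw [hfold]
  have hw : (if (((t.2 : Nat) : Int)) ≠ 0 then t.1.map Nat.digitChar ++ PySem.Int.toChars ((t.2 : Nat) : Int) else t.1.map Nat.digitChar)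
      = (t.1 ++ (if t.2 ≠ 0 then [t.2] else [])).map Nat.digitChar := by
    by_cases hz : t.2 = 0
    · simp [hz]
    · have h1 : t.2 = 1 := by omega
      simp [h1]
      decide
  rw [hw]
  set w := t.1 ++ (if t.2 ≠ 0 then [t.2] else []) with hwdef
  have hwdig : ∀ d ∈ w, d < 10 := by
    intro d hd
    rcases List.mem_append.mp hd with h | h
    · exact hdig d h
    · by_cases hz : t.2 = 0 <;> simp [hz] at h
      omega
  have hUne : Nat.digits 10 m ≠ [] := Nat.digits_ne_nil_iff_ne_zero.mpr (by omega)
  have ht1ne : t.1 ≠ [] := by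
    intro h
    rw [h] at hlen1
    exact hUne (List.eq_nil_of_length_eq_zero hlen1.symm)
  have hwlast : ∀ h : w ≠ [], w.getLast h ≠ 0 := by
    intro h
    rw [pv_getLast_getD w h]
    by_cases hz : t.2 = 0
    · have hle := hlast hz
      have hU0 := Nat.getLast_digit_ne_zero 10 (show m ≠ 0 by omega)
      rw [pv_getLast_getD _ hUne] at hU0
      have hwt : w.getLast?.getD 0 = t.1.getLast?.getD 0 := by
        rw [hwdef]
        simp [hz]
      omega
    · have h1 : t.2 = 1 := by omega
      have hwt : w.getLast?.getD 0 = 1 := by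
        rw [hwdef]
        simp [h1]
      omega
  have hwval : Nat.ofDigits 10 w = m + k := by
    by_cases hz : t.2 = 0
    · have hv2 := hval
      rw [hz] at hv2
      simp only [zero_mul, add_zero] at hv2
      rw [Nat.ofDigits_digits, Nat.ofDigits_digits] at hv2
      rw [hwdef]
      simp [hz, hv2]
    · have h1 : t.2 = 1 := by omega
      have hv2 := hval
      rw [h1] at hv2
      rw [Nat.ofDigits_digits, Nat.ofDigits_digits] at hv2
      rw [hwdef]
      simp only [h1]
      rw [if_pos (by norm_num : (1:Nat) ≠ 0)]
      rw [Nat.ofDigits_append, Nat.ofDigits_singleton, hlen1]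
      linarith [hv2]
  have hwdigits : w = Nat.digits 10 (m + k) := by
    rw [← hwval, Nat.digits_ofDigits 10 (by norm_num) w hwdig hwlast]
  rw [hwdigits, ← pv_toChars_eq (m + k) (by omega)]
  rfl

lemma pv_gsd (m k : Nat) (hm : 1 ≤ m) (hk : 1 ≤ k) :
    get_sum_of_dec (PySem.Int.toStr (m : Int)) (PySem.Int.toStr (k : Int))
      = PySem.Int.toStr ((m + k : Nat) : Int) := by
  have hm0 : m ≠ 0 := by omega
  have hk0 : k ≠ 0 := by omega
  have hlm : (PySem.Int.toStr (m : Int)).toList = ((Nat.digits 10 m).map Nat.digitChar).reverse := by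
    rw [PySem.Int.toList_toStr, pv_toChars_eq m hm0]
  have hlk : (PySem.Int.toStr (k : Int)).toList = ((Nat.digits 10 k).map Nat.digitChar).reverse := by
    rw [PySem.Int.toList_toStr, pv_toChars_eq k hk0]
  unfold get_sum_of_dec
  simp only [PySem.Str.len_eq, hlm, hlk, List.length_reverse, List.length_map,
    List.reverse_reverse]
  by_cases hl : (Nat.digits 10 k).length ≤ (Nat.digits 10 m).length
  · have hc : (((Nat.digits 10 k).length : Nat) : Int) ≤ (((Nat.digits 10 m).length : Nat) : Int) := by
      exact_mod_cast hl
    rw [if_pos hc]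
    exact pv_core m k hm hk hl
  · have hc : ¬ ((((Nat.digits 10 k).length : Nat) : Int) ≤ (((Nat.digits 10 m).length : Nat) : Int)) := by
      exact_mod_cast hl
    rw [if_neg hc]
    rw [show m + k = k + m from Nat.add_comm m k]
    exact pv_core k m hk hm (by omega)

-- B computes the Fibonacci strings
def pvFibs (n : Nat) : List String :=
  (List.range n).map (fun j => PySem.Int.toStr (Nat.fib (j + 1) : Int))

lemma pv_alt_loop (l : List Int) : ∀ (out : List String) (j : Nat),
    (l.foldl (fun (st : List String × Int × Int) _ =>
        (st.1 ++ [PySem.Int.toStr st.2.1], st.2.2, st.2.1 + st.2.2))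
      (out, (Nat.fib (j+1) : Int), (Nat.fib (j+2) : Int))).1
    = out ++ (List.range l.length).map (fun t => PySem.Int.toStr (Nat.fib (j + t + 1) : Int)) := by
  induction l with
  | nil => intro out j; simp
  | cons a l ih =>
    intro out j
    simp only [List.foldl_cons, List.length_cons]
    have hfib : (Nat.fib (j+1) : Int) + (Nat.fib (j+2) : Int) = (Nat.fib (j+3) : Int) := by
      have h3 : Nat.fib (j+3) = Nat.fib (j+1) + Nat.fib (j+2) := Nat.fib_add_two
      exact_mod_cast h3.symm
    rw [show ((out ++ [PySem.Int.toStr (Nat.fib (j+1) : Int)], (Nat.fib (j+2) : Int),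
          (Nat.fib (j+1) : Int) + (Nat.fib (j+2) : Int)) : List String × Int × Int)
        = (out ++ [PySem.Int.toStr (Nat.fib (j+1) : Int)], (Nat.fib (j+1+1) : Int),
          (Nat.fib (j+1+2) : Int)) from by rw [hfib]]
    rw [ih (out ++ [PySem.Int.toStr (Nat.fib (j+1) : Int)]) (j+1)]
    rw [List.range_succ_eq_map]
    simp only [List.map_cons, List.map_map, List.append_assoc, List.singleton_append,
      Function.comp_def]
    simp only [show ∀ t, j + 1 + t + 1 = j + (t + 1) + 1 from fun t => by omega]

lemma pv_alt_eq (x : Int) (hx : 1 ≤ x) : f_dyn_alt x = pvFibs x.toNat := by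
  obtain ⟨n, rfl⟩ : ∃ n : Nat, x = (n : Int) := ⟨x.toNat, (Int.toNat_of_nonneg (by omega)).symm⟩
  unfold f_dyn_alt
  rw [PySem.List.pyRange_zero_natCast]
  rw [show (([], 1, 1) : List String × Int × Int)
      = (([], ((Nat.fib 1 : Nat) : Int), ((Nat.fib 2 : Nat) : Int))) from by norm_num]
  rw [pv_alt_loop]
  simp [pvFibs]

-- the loop body of A's port
def pvStepA (mem : List String) (i : Int) : List String :=
  mem.set (i-1).toNat (get_sum_of_dec ((PySem.List.pyGet? mem (i-2)).getD "")
                                      ((PySem.List.pyGet? mem (i-3)).getD ""))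

lemma pv_stepA_append (mem : List String) (e : String) (j : Nat)
    (h3 : 3 ≤ j) (hj : j ≤ mem.length) :
    pvStepA (mem ++ [e]) (j : Int) = pvStepA mem (j : Int) ++ [e] := by
  unfold pvStepA
  have h1 : ((j : Int) - 1).toNat = j - 1 := by omega
  have h2 : ((j : Int) - 2) = ((j - 2 : Nat) : Int) := by omega
  have h3' : ((j : Int) - 3) = ((j - 3 : Nat) : Int) := by omega
  rw [h1, h2, h3']
  rw [PySem.List.pyGet?_natCast, PySem.List.pyGet?_natCast,
      PySem.List.pyGet?_natCast, PySem.List.pyGet?_natCast]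
  rw [List.getElem?_append_left (by omega), List.getElem?_append_left (by omega)]
  rw [List.set_append_left _ _ (by omega)]

lemma pv_foldA_append (is : List Int) : ∀ (mem : List String) (e : String),
    (∀ i ∈ is, ∃ j : Nat, i = (j : Int) ∧ 3 ≤ j ∧ j ≤ mem.length) →
    is.foldl pvStepA (mem ++ [e]) = (is.foldl pvStepA mem) ++ [e] := by
  induction is with
  | nil => intro mem e _; rfl
  | cons i is ih =>
    intro mem e hmem
    obtain ⟨j, rfl, h3, hj⟩ := hmem i (by simp)
    simp only [List.foldl_cons]
    rw [pv_stepA_append mem e j h3 hj]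
    apply ih
    intro i hi
    obtain ⟨j', rfl, h3', hj'⟩ := hmem i (by simp [hi])
    exact ⟨j', rfl, h3', by simpa [pvStepA] using hj'⟩

lemma pv_main : ∀ n : Nat, 2 ≤ n →
    (PySem.List.pyRange 3 ((n : Int) + 1)).foldl pvStepA
      ("1" :: "1" :: List.replicate (n - 2) "0") = pvFibs n := by
  intro n hn
  induction n, hn using Nat.le_induction with
  | base =>
    rw [show ((2 : Nat) : Int) + 1 = 3 from by norm_num]
    rw [show PySem.List.pyRange 3 3 = [] from by decide]
    decide
  | succ n hn ih =>
    have hsplit : PySem.List.pyRange 3 (((n + 1 : Nat) : Int) + 1)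
        = PySem.List.pyRange 3 ((n : Int) + 1) ++ [(n : Int) + 1] := by
      rw [show (((n + 1 : Nat) : Int) + 1) = ((n : Int) + 1) + 1 from by push_cast; ring]
      exact PySem.List.pyRange_one_succ_right (by omega)
    have hinit : ("1" :: "1" :: List.replicate (n + 1 - 2) "0")
        = ("1" :: "1" :: List.replicate (n - 2) "0") ++ ["0"] := by
      rw [show n + 1 - 2 = (n - 2) + 1 from by omega, List.replicate_succ']
      simp
    rw [hsplit, hinit, List.foldl_append]
    rw [pv_foldA_append _ _ _ (by
      intro i hi
      have hmem := PySem.List.mem_pyRange_one.mp hi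
      refine ⟨i.toNat, by omega, by omega, by simp [List.length_replicate]; omega⟩)]
    rw [ih]
    simp only [List.foldl_cons, List.foldl_nil]
    have hcast : ((n : Int) + 1) = ((n + 1 : Nat) : Int) := by push_cast; ring
    rw [hcast]
    unfold pvStepA
    have h1 : (((n + 1 : Nat) : Int) - 1).toNat = n := by omega
    have h2 : (((n + 1 : Nat) : Int) - 2) = ((n - 1 : Nat) : Int) := by omega
    have h3 : (((n + 1 : Nat) : Int) - 3) = ((n - 2 : Nat) : Int) := by omega
    rw [h1, h2, h3, PySem.List.pyGet?_natCast, PySem.List.pyGet?_natCast]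
    have hlenf : (pvFibs n).length = n := by simp [pvFibs]
    have hg1 : (pvFibs n ++ ["0"])[(n - 1 : Nat)]? = some (PySem.Int.toStr (Nat.fib n : Int)) := by
      rw [List.getElem?_append_left (by omega)]
      unfold pvFibs
      rw [List.getElem?_map]
      simp [List.getElem?_range (show n - 1 < n by omega), show n - 1 + 1 = n from by omega]
    have hg2 : (pvFibs n ++ ["0"])[(n - 2 : Nat)]? = some (PySem.Int.toStr (Nat.fib (n-1) : Int)) := by
      rw [List.getElem?_append_left (by omega)]
      unfold pvFibs
      rw [List.getElem?_map]
      simp [List.getElem?_range (show n - 2 < n by omega), show n - 2 + 1 = n - 1 from by omega]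
    rw [hg1, hg2]
    simp only [Option.getD_some]
    rw [pv_gsd (Nat.fib n) (Nat.fib (n-1)) (Nat.fib_pos.mpr (by omega)) (Nat.fib_pos.mpr (by omega))]
    have hfib : Nat.fib n + Nat.fib (n - 1) = Nat.fib (n + 1) := by
      have := Nat.fib_add_two (n := n - 1)
      rw [show n - 1 + 2 = n + 1 from by omega, show n - 1 + 1 = n from by omega] at this
      omega
    rw [hfib]
    rw [List.set_append_right _ _ (by omega)]
    rw [show n - (pvFibs n).length = 0 from by omega]
    unfold pvFibs
    rw [List.range_succ]
    simp

-- A computes the Fibonacci strings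
lemma pv_a_eq (x : Int) (hx : 1 ≤ x) : f_dyn x = pvFibs x.toNat := by
  obtain ⟨n, rfl⟩ : ∃ n : Nat, x = (n : Int) := ⟨x.toNat, (Int.toNat_of_nonneg (by omega)).symm⟩
  simp only [f_dyn]
  have hconst : ∀ (l : List Int), List.map (fun _ => "0") l = List.replicate l.length "0" := by
    intro l
    induction l with
    | nil => rfl
    | cons a t ih => simp [List.replicate_succ, ih]
  rw [hconst, PySem.List.pyRange_zero_natCast, List.length_map, List.length_range,
      Int.toNat_natCast]
  rcases Nat.lt_or_ge n 2 with h2 | h2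
  · have hn1 : n = 1 := by omega
    subst hn1
    decide
  · rw [if_pos (by exact_mod_cast Nat.lt_of_lt_of_le Nat.one_lt_two h2)]
    have hrep : List.replicate n "0" = "0" :: "0" :: List.replicate (n - 2) "0" := by
      rw [show n = (n - 2) + 1 + 1 from by omega]
      simp [List.replicate_succ]
    rw [hrep]
    rw [show (("0" :: "0" :: List.replicate (n - 2) "0").set 0 "1").set 1 "1"
        = "1" :: "1" :: List.replicate (n - 2) "0" from by simp]
    exact pv_main n h2

-- ===== VERDICT (by name: the statement is the Claim_ definition above) =====
theorem f_dyn_spec : Claim_equal_f_dyn := by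
  intro x _ hx
  unfold Spec_f_dyn
  rw [pv_a_eq x hx, pv_alt_eq x hx]
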